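-- pv_equiv track=rewrite | github.com/ghltorrhdiddl2/codingtest | p_level1_sj/nov/nov_10/phone_book.py | solution
-- ===== SOURCE A (Python) =====
-- def solution(phone_book):
--     flag = True
--
--     for i in range(len(phone_book)-1):
--         for j in range(1,len(phone_book)):
--             if phone_book[i] != phone_book[j]:
--                 if phone_book[i] in phone_book[j]:
--                     flag = False
--                 elif phone_book[j] in phone_book[i]:
--                     flag = False
--     return flag
-- ===== SOURCE B (Python) =====
-- def solution(phone_book):
--     # distinct values, shortest first: a containment pair always has the
--     # shorter string strictly earlier, so one direction suffices
--     uniq = sorted(set(phone_book), key=len)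
--     for i, s in enumerate(uniq):
--         if any(s in t for t in uniq[i + 1:]):
--             return False
--     return True
-- ===== Notes on version B (the rewrite author's own statement) =====
-- stated objective: faster
-- what changed: Instead of a full quadratic double loop over all index pairs testing containment in both directions with no early exit, B deduplicates the strings, sorts them by length, tests containment only against strictly later (no-shorter) strings, and returns as soon as a containment is found.
import Mathlib
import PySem

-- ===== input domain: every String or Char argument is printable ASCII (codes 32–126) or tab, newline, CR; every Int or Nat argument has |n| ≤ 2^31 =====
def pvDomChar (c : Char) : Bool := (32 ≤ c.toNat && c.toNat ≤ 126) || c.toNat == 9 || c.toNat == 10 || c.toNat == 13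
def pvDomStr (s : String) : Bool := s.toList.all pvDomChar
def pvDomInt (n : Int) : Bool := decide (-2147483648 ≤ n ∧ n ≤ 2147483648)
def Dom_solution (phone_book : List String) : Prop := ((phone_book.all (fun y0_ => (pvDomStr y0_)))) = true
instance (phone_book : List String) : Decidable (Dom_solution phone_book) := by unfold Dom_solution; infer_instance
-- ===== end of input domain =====

-- B replaces A's exit-free double loop (both directions, all index pairs) by: dedup, sort by
-- length, test containment only against strictly later strings, early exit on the first hit.

-- ===== PORT A =====
def solution (phone_book : List String) : Bool :=
  (PySem.List.pyRange 0 ((phone_book.length : Int) - 1) 1).foldl (fun flag i =>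
    (PySem.List.pyRange 1 (phone_book.length : Int) 1).foldl (fun flag j =>
      if PySem.List.pyGetD phone_book i "" ≠ PySem.List.pyGetD phone_book j "" then
        if PySem.Str.isIn (PySem.List.pyGetD phone_book i "") (PySem.List.pyGetD phone_book j "") then
          false
        else if PySem.Str.isIn (PySem.List.pyGetD phone_book j "") (PySem.List.pyGetD phone_book i "") then
          false
        else flag
      else flag) flag) true

-- ===== PORT B =====
-- the for-loop of Source B: each element against the strictly later ones, early return on a hit
def altCheck : List String → Bool
  | [] => true
  | s :: rest => if rest.any (fun t => PySem.Str.isIn s t) then false else altCheck rest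

def solution_alt (phone_book : List String) : Bool :=
  altCheck (PySem.List.sorted (PySem.Set.ofList phone_book) (fun s => PySem.Str.len s) false)

-- ===== PRECONDITION & SPEC =====
def Spec_solution (phone_book : List String) (out : Bool) : Prop := out = solution_alt phone_book
instance (phone_book : List String) (out : Bool) : Decidable (Spec_solution phone_book out) := by unfold Spec_solution; infer_instance

-- ===== CLAIM (what is proved, stated in full; the proofs are below) =====
def Claim_equal_solution : Prop := ∀ (phone_book : List String), Dom_solution phone_book → Spec_solution phone_book (solution phone_book)

-- ===== LEMMAS AND PROOFS =====

-- the semantic content both programs compute: some two distinct strings of the list,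
-- one an infix of the other
def Bad (pb : List String) : Prop :=
  ∃ u ∈ pb, ∃ v ∈ pb, u ≠ v ∧ u.toList <:+: v.toList


-- the Boolean pair test A's inner loop performs at indices (i, j)
def aTest (pb : List String) (i j : Int) : Bool :=
  decide (PySem.List.pyGetD pb i "" ≠ PySem.List.pyGetD pb j "") &&
    (PySem.Str.isIn (PySem.List.pyGetD pb i "") (PySem.List.pyGetD pb j "") ||
     PySem.Str.isIn (PySem.List.pyGetD pb j "") (PySem.List.pyGetD pb i ""))

theorem solution_eq_not_any (pb : List String) :
    solution pb =
      !((PySem.List.pyRange 0 ((pb.length : Int) - 1) 1).any (fun i =>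
          (PySem.List.pyRange 1 (pb.length : Int) 1).any (fun j => aTest pb i j))) := by
  unfold solution
  have hinner : ∀ (i : Int) (flag : Bool),
      (PySem.List.pyRange 1 (pb.length : Int) 1).foldl (fun flag j =>
        if PySem.List.pyGetD pb i "" ≠ PySem.List.pyGetD pb j "" then
          if PySem.Str.isIn (PySem.List.pyGetD pb i "") (PySem.List.pyGetD pb j "") then false
          else if PySem.Str.isIn (PySem.List.pyGetD pb j "") (PySem.List.pyGetD pb i "") then false
          else flag
        else flag) flag
      = (flag && !((PySem.List.pyRange 1 (pb.length : Int) 1).any (fun j => aTest pb i j))) := by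
    intro i flag
    rw [← PySem.List.foldl_if_false_eq (fun j => aTest pb i j)]
    apply PySem.List.foldl_congr_mem
    intro acc j _
    by_cases hne : PySem.List.pyGetD pb i "" = PySem.List.pyGetD pb j ""
    · simp [aTest, hne]
    · cases h1 : PySem.Str.isIn (PySem.List.pyGetD pb i "") (PySem.List.pyGetD pb j "") <;>
      cases h2 : PySem.Str.isIn (PySem.List.pyGetD pb j "") (PySem.List.pyGetD pb i "") <;>
      simp only [aTest, h1, h2, if_true, if_false, Bool.false_eq_true,
        Bool.or_self, Bool.or_true, Bool.or_false,
        Bool.and_true, Bool.and_false, ne_eq, hne, not_false_eq_true, decide_true,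
        ite_self]
  have houter : ∀ flag,
      (PySem.List.pyRange 0 ((pb.length : Int) - 1) 1).foldl (fun flag i =>
        (PySem.List.pyRange 1 (pb.length : Int) 1).foldl (fun flag j =>
          if PySem.List.pyGetD pb i "" ≠ PySem.List.pyGetD pb j "" then
            if PySem.Str.isIn (PySem.List.pyGetD pb i "") (PySem.List.pyGetD pb j "") then false
            else if PySem.Str.isIn (PySem.List.pyGetD pb j "") (PySem.List.pyGetD pb i "") then false
            else flag
          else flag) flag) flag
      = (flag && !((PySem.List.pyRange 0 ((pb.length : Int) - 1) 1).any (fun i =>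
          (PySem.List.pyRange 1 (pb.length : Int) 1).any (fun j => aTest pb i j)))) := by
    intro flag
    rw [← PySem.List.foldl_if_false_eq
      (fun i => (PySem.List.pyRange 1 (pb.length : Int) 1).any (fun j => aTest pb i j))]
    apply PySem.List.foldl_congr_mem
    intro acc i _
    rw [hinner i acc]
    cases h : (PySem.List.pyRange 1 (pb.length : Int) 1).any (fun j => aTest pb i j) <;>
      simp
  rw [houter true, Bool.true_and]

theorem solution_false_iff (pb : List String) : solution pb = false ↔ Bad pb := by
  rw [solution_eq_not_any, Bool.not_eq_false']
  simp only [List.any_eq_true, PySem.List.mem_pyRange_one]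
  constructor
  · rintro ⟨i, ⟨hi0, hi1⟩, j, ⟨hj0, hj1⟩, hT⟩
    have hi : i < (pb.length : Int) := lt_of_lt_of_le hi1 (by omega)
    rw [aTest, PySem.List.pyGetD_eq_getElem pb "" hi0 hi,
        PySem.List.pyGetD_eq_getElem pb "" (by omega) hj1] at hT
    simp only [Bool.and_eq_true, Bool.or_eq_true, decide_eq_true_eq] at hT
    rcases hT with ⟨hne, h | h⟩
    · exact ⟨_, List.getElem_mem _, _, List.getElem_mem _, hne,
        (PySem.Str.isIn_iff_infix _ _).mp h⟩
    · exact ⟨_, List.getElem_mem _, _, List.getElem_mem _, Ne.symm hne,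
        (PySem.Str.isIn_iff_infix _ _).mp h⟩
  · rintro ⟨u, hu, v, hv, hne, hinf⟩
    rcases List.mem_iff_getElem.mp hu with ⟨p, hp, hpu⟩
    rcases List.mem_iff_getElem.mp hv with ⟨q, hq, hqv⟩
    have hpq : p ≠ q := fun h => hne (hpu.symm.trans (h ▸ hqv))
    rcases Nat.lt_or_ge p q with h | h
    · refine ⟨(p : Nat), ⟨by positivity, by omega⟩,
              (q : Nat), ⟨by omega, by omega⟩, ?_⟩
      rw [aTest, PySem.List.pyGetD_eq_getElem pb "" (by positivity) (by omega),
          PySem.List.pyGetD_eq_getElem pb "" (by positivity) (by omega)]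
      simp only [Int.toNat_natCast, Bool.and_eq_true, Bool.or_eq_true, decide_eq_true_eq]
      rw [hpu, hqv]
      exact ⟨hne, Or.inl ((PySem.Str.isIn_iff_infix u v).mpr hinf)⟩
    · have h' : q < p := by omega
      refine ⟨(q : Nat), ⟨by positivity, by omega⟩,
              (p : Nat), ⟨by omega, by omega⟩, ?_⟩
      rw [aTest, PySem.List.pyGetD_eq_getElem pb "" (by positivity) (by omega),
          PySem.List.pyGetD_eq_getElem pb "" (by positivity) (by omega)]
      simp only [Int.toNat_natCast, Bool.and_eq_true, Bool.or_eq_true, decide_eq_true_eq]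
      rw [hpu, hqv]
      exact ⟨Ne.symm hne, Or.inr ((PySem.Str.isIn_iff_infix u v).mpr hinf)⟩

theorem altCheck_true_iff (l : List String) :
    altCheck l = true ↔ l.Pairwise (fun s t => PySem.Str.isIn s t = false) := by
  induction l with
  | nil => simp [altCheck]
  | cons s rest ih =>
    rw [List.pairwise_cons, ← ih]
    cases hany : rest.any (fun t => PySem.Str.isIn s t) with
    | true =>
      simp only [altCheck, hany, if_true, Bool.false_eq_true, false_iff, not_and]
      rw [List.any_eq_true] at hany
      rcases hany with ⟨t, ht, hin⟩
      intro h
      rw [h t ht] at hin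
      cases hin
    | false =>
      simp only [altCheck, hany, Bool.false_eq_true, if_false]
      rw [List.any_eq_false] at hany
      constructor
      · intro h; exact ⟨fun t ht => Bool.eq_false_iff.mpr (hany t ht), h⟩
      · rintro ⟨-, h⟩; exact h

-- the sorted, deduplicated list B scans
def altList (pb : List String) : List String :=
  PySem.List.sorted (PySem.Set.ofList pb) (fun s => PySem.Str.len s) false

theorem altList_nodup (pb : List String) : (altList pb).Nodup :=
  ((PySem.List.sorted_perm _ _ _).nodup_iff).mpr (PySem.Set.nodup_ofList pb)

theorem mem_altList (pb : List String) (x : String) : x ∈ altList pb ↔ x ∈ pb := by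
  rw [altList, PySem.List.mem_sorted, PySem.Set.mem_ofList]

theorem infix_length_lt {u v : String} (hne : u ≠ v) (hinf : u.toList <:+: v.toList) :
    u.toList.length < v.toList.length := by
  rcases lt_or_eq_of_le hinf.length_le with h | h
  · exact h
  · exact absurd (String.toList_inj.mp (hinf.sublist.eq_of_length h)) hne

theorem alt_false_iff (pb : List String) : solution_alt pb = false ↔ Bad pb := by
  have hchar : solution_alt pb = altCheck (altList pb) := rfl
  rw [hchar]
  constructor
  · intro h
    have hnp : ¬ (altList pb).Pairwise (fun s t => PySem.Str.isIn s t = false) := by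
      intro hp
      rw [← altCheck_true_iff] at hp
      simp [hp] at h
    rw [List.pairwise_iff_getElem] at hnp
    push Not at hnp
    rcases hnp with ⟨i, j, hi, hj, hij, hin⟩
    rw [Bool.ne_false_iff] at hin
    refine ⟨(altList pb)[i], (mem_altList pb _).mp (List.getElem_mem hi),
            (altList pb)[j], (mem_altList pb _).mp (List.getElem_mem hj), ?_, ?_⟩
    · intro he
      exact absurd (((altList_nodup pb).getElem_inj_iff).mp he) (Nat.ne_of_lt hij)
    · exact (PySem.Str.isIn_iff_infix _ _).mp hin
  · rintro ⟨u, hu, v, hv, hne, hinf⟩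
    have hlen := infix_length_lt hne hinf
    rcases List.mem_iff_getElem.mp ((mem_altList pb u).mpr hu) with ⟨p, hp, hpu⟩
    rcases List.mem_iff_getElem.mp ((mem_altList pb v).mpr hv) with ⟨q, hq, hqv⟩
    have hpq : p < q := by
      rcases lt_trichotomy p q with h | h | h
      · exact h
      · exact absurd (hpu.symm.trans (h ▸ hqv)) hne
      · have hmono : PySem.Str.len (altList pb)[q] ≤ PySem.Str.len (altList pb)[p] :=
          PySem.List.key_sorted_getElem_mono (PySem.Set.ofList pb)
            (fun s => PySem.Str.len s) (Nat.le_of_lt h) hp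
        rw [hpu, hqv] at hmono
        simp only [PySem.Str.len_eq] at hmono
        omega
    cases hcheck : altCheck (altList pb) with
    | true =>
      have hp2 := (altCheck_true_iff (altList pb)).mp hcheck
      rw [List.pairwise_iff_getElem] at hp2
      have := hp2 p q hp hq hpq
      rw [hpu, hqv] at this
      rw [(PySem.Str.isIn_iff_infix u v).mpr hinf] at this
      exact absurd this (by simp)
    | false => rfl

-- ===== VERDICT (by name: the statement is the Claim_ definition above) =====
theorem solution_spec : Claim_equal_solution := by
  intro pb _
  unfold Spec_solution
  rcases h : solution_alt pb with _ | _
  · exact (solution_false_iff pb).mpr ((alt_false_iff pb).mp h)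
  · rcases h2 : solution pb with _ | _
    · exact absurd ((alt_false_iff pb).mpr ((solution_false_iff pb).mp h2)) (by simp [h])
    · rfl
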